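-- pv_equiv track=rewrite | github.com/davweb/adventofcode2017 | advent/year2018/day23.py | part2
-- ===== SOURCE A (Python) =====
-- def distance(a, b):
--     """
--     >>> distance((0, 0, 0), (1, 3, 1))
--     5
--     >>> distance((1, 3, 1), (0, 0, 0))
--     5
--     >>> distance((1, 3, 1), (1, 3, 1))
--     0
--     >>> distance((1, 3, 1), (-1, -3, -2))
--     11
--     """
--
--     return abs(a[0] - b[0]) + abs(a[1] - b[1]) + abs(a[2] - b[2])
--
-- def part2(nanobots):
--     """
--     >>> part2([
--     ...     ((10, 12, 12), 2),
--     ...     ((12, 14, 12), 2),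
--     ...     ((16, 12, 12), 4),
--     ...     ((14, 14, 14), 6),
--     ...     ((50, 50, 50), 200),
--     ...     ((10, 10, 10), 5)
--     ... ])
--     36
--
--     # >>> part2(read_input())
--     # 0
--     """
--
--     count = {}
--
--     for bot in nanobots:
--         ((x, y, z), bot_range) = bot
--
--         for dx in range(-bot_range, bot_range + 1):
--             yrange = bot_range - abs(dx)
--
--             for dy in range(-yrange, yrange + 1):
--                 zrange = bot_range - abs(dx) - abs(dy)
--
--                 for dz in range(-zrange, zrange + 1):
--                     location = (x + dx, y + dy, z + dz)
--
--                     if location in count: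
--                         count[location] += 1
--                     else:
--                         count[location] = 1
--
--     max_count = max(count.values())
--     options = [location for (location, location_count) in count.items() if location_count == max_count]
--     return min(distance((0, 0, 0), location) for location in options)
-- ===== SOURCE B (Python) =====
-- def part2(nanobots):
--     # Per bot and per (dx, dy) column, the covered z's form the interval
--     # [z - rest2, z + rest2].  A point of maximal coverage and minimal
--     # distance is always attained at an interval endpoint or at z = 0 inside
--     # a covered column, so only those points (instead of every enumerated
--     # ball point) need to be examined; each candidate's coverage is then
--     # counted by a direct distance test against all bots.
--     candidates = set()
--     for ((x, y, z), bot_range) in nanobots: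
--         for dx in range(-bot_range, bot_range + 1):
--             rest = bot_range - abs(dx)
--             for dy in range(-rest, rest + 1):
--                 rest2 = rest - abs(dy)
--                 px = x + dx
--                 py = y + dy
--                 candidates.add((px, py, z - rest2))
--                 candidates.add((px, py, z + rest2))
--                 if z - rest2 <= 0 <= z + rest2:
--                     candidates.add((px, py, 0))
--     best = None
--     for (px, py, pz) in candidates:
--         c = 0
--         for ((bx, by, bz), br) in nanobots:
--             if abs(px - bx) + abs(py - by) + abs(pz - bz) <= br:
--                 c += 1
--         d = abs(px) + abs(py) + abs(pz)
--         if best is None or c > best[0] or (c == best[0] and d < best[1]):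
--             best = (c, d)
--     return best[1]
-- ===== Notes on version B (the rewrite author's own statement) =====
-- stated objective: alternative
-- what changed: A enumerates every lattice point of every ball into an incremented dict and then takes three passes (max of values, filter, min of distances); B only collects the provably sufficient candidate points (per (dx,dy) column the covered z-interval's endpoints plus z=0 of covered columns), counts each candidate's coverage by a direct Manhattan-distance test against all bots, and tracks the lexicographically best (count desc, distance asc) pair in one pass.
import Mathlib
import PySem

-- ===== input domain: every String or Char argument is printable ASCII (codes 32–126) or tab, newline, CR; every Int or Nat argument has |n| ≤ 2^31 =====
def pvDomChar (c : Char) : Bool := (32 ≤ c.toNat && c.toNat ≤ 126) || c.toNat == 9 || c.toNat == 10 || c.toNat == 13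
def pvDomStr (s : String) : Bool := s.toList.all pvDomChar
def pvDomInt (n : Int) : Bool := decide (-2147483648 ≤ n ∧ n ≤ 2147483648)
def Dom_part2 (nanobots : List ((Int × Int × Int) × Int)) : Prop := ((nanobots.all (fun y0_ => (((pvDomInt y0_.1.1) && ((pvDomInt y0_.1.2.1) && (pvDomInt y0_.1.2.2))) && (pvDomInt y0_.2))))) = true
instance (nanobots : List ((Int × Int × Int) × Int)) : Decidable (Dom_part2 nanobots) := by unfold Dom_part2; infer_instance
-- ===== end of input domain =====

-- B replaces A's full-ball enumeration with dict counting and three result passes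
-- (max / filter / min) by a much smaller candidate set — per (dx, dy) column only the covered
-- z-interval's endpoints and z = 0 of covered columns, where the optimum is provably attained —
-- counted by a direct distance test per candidate with one lexicographic best-tracking pass
-- (objective: alternative algorithm, same exact result).
-- Representation note: Python's hash-based dict/set are ported as balanced-tree maps
-- (Std.TreeMap) so the ports evaluate in O(k log k); every place the Python consumes the
-- container's iteration order (max of values, filter+min, the best-tracking pass over the set)
-- is an extremum whose VALUE is order-independent — that independence is part of the proof below.

-- lexicographic comparator for the (x, y, z) point keys
def cmp3 (a b : Int × Int × Int) : Ordering :=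
  compareLex (compareOn (·.1)) (compareLex (compareOn (·.2.1)) (compareOn (·.2.2))) a b

-- ===== PORT A =====
def distance (a b : Int × Int × Int) : Int :=
  |a.1 - b.1| + |a.2.1 - b.2.1| + |a.2.2 - b.2.2|

def part2 (nanobots : List ((Int × Int × Int) × Int)) : Int :=
  let count : Std.TreeMap (Int × Int × Int) Int cmp3 :=
    nanobots.foldl (fun count bot =>
      let x := bot.1.1
      let y := bot.1.2.1
      let z := bot.1.2.2
      let botRange := bot.2
      (PySem.List.pyRange (-botRange) (botRange + 1) 1).foldl (fun count dx =>
        let yrange := botRange - |dx|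
        (PySem.List.pyRange (-yrange) (yrange + 1) 1).foldl (fun count dy =>
          let zrange := botRange - |dx| - |dy|
          (PySem.List.pyRange (-zrange) (zrange + 1) 1).foldl (fun count dz =>
            let location := (x + dx, y + dy, z + dz)
            if count.contains location then
              count.insert location (count.getD location 0 + 1)
            else
              count.insert location 1) count) count) count) ∅
  -- count.values() / count.items(): the value/pair views of the dict.
  -- max() / min() raise ValueError on an empty sequence: those inputs are excluded by Pre_part2,
  -- so the .getD 0 defaults below are never reached under the claim.
  let maxCount : Int := (PySem.List.max? (count.toList.map (fun p => p.2)) (fun v => v)).getD 0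
  let options : List (Int × Int × Int) :=
    (count.toList.filter (fun p => p.2 == maxCount)).map (fun p => p.1)
  (PySem.List.min? (options.map (fun loc => distance (0, 0, 0) loc)) (fun v => v)).getD 0

-- ===== PORT B =====
def covers (p : Int × Int × Int) (bot : (Int × Int × Int) × Int) : Bool :=
  |p.1 - bot.1.1| + |p.2.1 - bot.1.2.1| + |p.2.2 - bot.1.2.2| ≤ bot.2

def part2_alt (nanobots : List ((Int × Int × Int) × Int)) : Int :=
  let candidates : Std.TreeMap (Int × Int × Int) Unit cmp3 :=
    nanobots.foldl (fun s bot =>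
      let x := bot.1.1
      let y := bot.1.2.1
      let z := bot.1.2.2
      let botRange := bot.2
      (PySem.List.pyRange (-botRange) (botRange + 1) 1).foldl (fun s dx =>
        let rest := botRange - |dx|
        (PySem.List.pyRange (-rest) (rest + 1) 1).foldl (fun s dy =>
          let rest2 := rest - |dy|
          let px := x + dx
          let py := y + dy
          let s := s.insert (px, py, z - rest2) ()
          let s := s.insert (px, py, z + rest2) ()
          if z - rest2 ≤ 0 ∧ 0 ≤ z + rest2 then s.insert (px, py, 0) () else s) s) s) ∅
  -- the fold below depends only on WHICH points are in the set (a lexicographic extremum of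
  -- values), never on its iteration order
  let best : Option (Int × Int) :=
    candidates.keys.foldl (fun best p =>
      let c : Int := nanobots.countP (fun bot => covers p bot)
      let d : Int := |p.1| + |p.2.1| + |p.2.2|
      match best with
      | none => some (c, d)
      | some (bc, bd) =>
          if c > bc ∨ (c = bc ∧ d < bd) then some (c, d) else some (bc, bd)) none
  -- best is none (Python: TypeError on best[1]) exactly when no point is covered: excluded by Pre_part2
  match best with
  | some q => q.2
  | none => 0

-- ===== PRECONDITION & SPEC =====
-- Pre_ excludes exactly the inputs with no bot of nonnegative range (in particular the empty
-- list), on which no lattice point is covered: A raises ValueError (max() of an empty sequence)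
-- and B raises TypeError (subscripting best = None).
def Pre_part2 (nanobots : List ((Int × Int × Int) × Int)) : Prop :=
  ∃ bot ∈ nanobots, 0 ≤ bot.2
instance (nanobots : List ((Int × Int × Int) × Int)) : Decidable (Pre_part2 nanobots) := by
  unfold Pre_part2; infer_instance

def pvWitness_part2 : (List ((Int × Int × Int) × Int)) :=
  [((10, 12, 12), 2), ((12, 14, 12), 2), ((10, 10, 10), 5)]

def Spec_part2 (nanobots : List ((Int × Int × Int) × Int)) (out : Int) : Prop := out = part2_alt nanobots
instance (nanobots : List ((Int × Int × Int) × Int)) (out : Int) : Decidable (Spec_part2 nanobots out) := by unfold Spec_part2; infer_instance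

-- ===== CLAIM (what is proved, stated in full; the proofs are below) =====
def Claim_equal_part2 : Prop := ∀ (nanobots : List ((Int × Int × Int) × Int)), Dom_part2 nanobots → Pre_part2 nanobots → Spec_part2 nanobots (part2 nanobots)

-- ===== LEMMAS AND PROOFS =====

-- comparator facts (plain defs, not instances; supplied to Std lemmas with haveI)
def tc3 : Std.TransCmp cmp3 := by unfold cmp3; infer_instance

def lec3 : Std.LawfulEqCmp cmp3 := by
  haveI : Std.ReflCmp cmp3 := by unfold cmp3; infer_instance
  refine Std.LawfulEqCmp.mk ?_
  intro a b h
  simp only [cmp3, compareLex, compareOn, Ordering.then_eq_eq, compare_eq_iff_eq] at h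
  exact Prod.ext h.1 (Prod.ext h.2.1 h.2.2)

lemma cmp3_eq_iff (a b : Int × Int × Int) : cmp3 a b = Ordering.eq ↔ a = b := by
  constructor
  · exact lec3.eq_of_compare
  · rintro rfl
    haveI : Std.ReflCmp cmp3 := by unfold cmp3; infer_instance
    exact Std.ReflCmp.compare_self

-- the lattice points of one bot's ball, in A's/B's (identical) per-bot enumeration order
def ball (bot : (Int × Int × Int) × Int) : List (Int × Int × Int) :=
  (PySem.List.pyRange (-bot.2) (bot.2 + 1) 1).flatMap (fun dx =>
    (PySem.List.pyRange (-(bot.2 - |dx|)) ((bot.2 - |dx|) + 1) 1).flatMap (fun dy =>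
      (PySem.List.pyRange (-(bot.2 - |dx| - |dy|)) ((bot.2 - |dx| - |dy|) + 1) 1).map (fun dz =>
        (bot.1.1 + dx, bot.1.2.1 + dy, bot.1.2.2 + dz))))

def pts (nanobots : List ((Int × Int × Int) × Int)) : List (Int × Int × Int) :=
  nanobots.flatMap ball

-- B's candidate points of one bot: per (dx, dy) column the covered z-interval's endpoints,
-- plus the column's z = 0 point when it is covered
def candsOf (bot : (Int × Int × Int) × Int) : List (Int × Int × Int) :=
  (PySem.List.pyRange (-bot.2) (bot.2 + 1) 1).flatMap (fun dx =>
    (PySem.List.pyRange (-(bot.2 - |dx|)) ((bot.2 - |dx|) + 1) 1).flatMap (fun dy =>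
      [(bot.1.1 + dx, bot.1.2.1 + dy, bot.1.2.2 - (bot.2 - |dx| - |dy|)),
       (bot.1.1 + dx, bot.1.2.1 + dy, bot.1.2.2 + (bot.2 - |dx| - |dy|))] ++
      (if bot.1.2.2 - (bot.2 - |dx| - |dy|) ≤ 0 ∧ 0 ≤ bot.1.2.2 + (bot.2 - |dx| - |dy|)
       then [(bot.1.1 + dx, bot.1.2.1 + dy, 0)] else [])))

def cands (nanobots : List ((Int × Int × Int) × Int)) : List (Int × Int × Int) :=
  nanobots.flatMap candsOf

-- a countP over a unit-step range whose predicate pins its argument to v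
lemma countP_pyRange_eq_ite (lo hi v : Int) (q : Int → Bool) (h : ∀ x, q x = true → x = v) :
    (PySem.List.pyRange lo hi 1).countP q = if lo ≤ v ∧ v < hi ∧ q v = true then 1 else 0 := by
  by_cases hv : q v = true
  · have hcong : (PySem.List.pyRange lo hi 1).countP q = (PySem.List.pyRange lo hi 1).count v := by
      unfold List.count
      refine List.countP_congr (fun x hx => ?_)
      constructor
      · intro hq; simp [h x hq]
      · intro hb; simp at hb; subst hb; exact hv
    rw [hcong]
    by_cases hmem : v ∈ PySem.List.pyRange lo hi 1
    · rw [List.count_eq_one_of_mem (PySem.List.nodup_pyRange_one lo hi) hmem]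
      have := PySem.List.mem_pyRange_one.mp hmem
      simp [this.1, this.2, hv]
    · rw [List.count_eq_zero_of_not_mem hmem]
      rw [PySem.List.mem_pyRange_one] at hmem
      rw [if_neg (by tauto)]
  · have : (PySem.List.pyRange lo hi 1).countP q = 0 := by
      rw [List.countP_eq_zero]
      intro a ha hqa
      exact hv (h a hqa ▸ hqa)
    rw [this]
    rw [if_neg (by tauto)]

lemma sum_map_ite_nat {α : Type} (l : List α) (P : α → Prop) [DecidablePred P] :
    (l.map (fun x => if P x then (1 : Nat) else 0)).sum = l.countP (fun x => decide (P x)) := by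
  induction l with
  | nil => simp
  | cons a l ih => by_cases h : P a <;> simp [h, ih] <;> omega

-- one ball enumerates each covered point exactly once
lemma count_ball (bot : (Int × Int × Int) × Int) (p : Int × Int × Int) :
    (ball bot).count p = if covers p bot then 1 else 0 := by
  obtain ⟨⟨x, y, z⟩, r⟩ := bot
  obtain ⟨a, b, c⟩ := p
  have hz : ∀ dx dy : Int,
      ((PySem.List.pyRange (-(r - |dx| - |dy|)) ((r - |dx| - |dy|) + 1) 1).map
        (fun dz => (x + dx, y + dy, z + dz))).count (a, b, c)
      = if (-(r - |dx| - |dy|) ≤ c - z ∧ c - z < (r - |dx| - |dy|) + 1 ∧ x + dx = a ∧ y + dy = b)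
        then 1 else 0 := by
    intro dx dy
    rw [List.count, List.countP_map]
    rw [countP_pyRange_eq_ite (-(r - |dx| - |dy|)) ((r - |dx| - |dy|) + 1) (c - z) _
      (by intro t ht; simp [Function.comp] at ht; omega)]
    refine if_congr ?_ rfl rfl
    simp only [Function.comp, beq_iff_eq, Prod.mk.injEq]
    omega
  have hy : ∀ dx : Int,
      ((PySem.List.pyRange (-(r - |dx|)) ((r - |dx|) + 1) 1).flatMap (fun dy =>
        (PySem.List.pyRange (-(r - |dx| - |dy|)) ((r - |dx| - |dy|) + 1) 1).map
          (fun dz => (x + dx, y + dy, z + dz)))).count (a, b, c)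
      = if (-(r - |dx|) ≤ b - y ∧ b - y < (r - |dx|) + 1 ∧
            -(r - |dx| - |b - y|) ≤ c - z ∧ c - z < (r - |dx| - |b - y|) + 1 ∧ x + dx = a)
        then 1 else 0 := by
    intro dx
    rw [List.count_flatMap]
    rw [List.map_congr_left (fun dy (_ : dy ∈ PySem.List.pyRange (-(r - |dx|)) ((r - |dx|) + 1) 1) =>
      (by simp only [Function.comp]; exact hz dx dy :
        ((List.count (a, b, c)) ∘ (fun dy =>
          (PySem.List.pyRange (-(r - |dx| - |dy|)) ((r - |dx| - |dy|) + 1) 1).map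
            (fun dz => (x + dx, y + dy, z + dz)))) dy
        = if (-(r - |dx| - |dy|) ≤ c - z ∧ c - z < (r - |dx| - |dy|) + 1 ∧ x + dx = a ∧ y + dy = b)
          then 1 else 0))]
    rw [sum_map_ite_nat]
    rw [countP_pyRange_eq_ite _ _ (b - y) _ (by intro t ht; simp at ht; omega)]
    refine if_congr ?_ rfl rfl
    simp only [decide_eq_true_eq, Int.abs_eq_natAbs]
    omega
  rw [show ball ((x, y, z), r) = (PySem.List.pyRange (-r) (r + 1) 1).flatMap (fun dx =>
    (PySem.List.pyRange (-(r - |dx|)) ((r - |dx|) + 1) 1).flatMap (fun dy =>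
      (PySem.List.pyRange (-(r - |dx| - |dy|)) ((r - |dx| - |dy|) + 1) 1).map
        (fun dz => (x + dx, y + dy, z + dz)))) from rfl]
  rw [List.count_flatMap]
  rw [List.map_congr_left (fun dx (_ : dx ∈ PySem.List.pyRange (-r) (r + 1) 1) =>
    (by simp only [Function.comp]; exact hy dx :
      ((List.count (a, b, c)) ∘ (fun dx =>
        (PySem.List.pyRange (-(r - |dx|)) ((r - |dx|) + 1) 1).flatMap (fun dy =>
          (PySem.List.pyRange (-(r - |dx| - |dy|)) ((r - |dx| - |dy|) + 1) 1).map
            (fun dz => (x + dx, y + dy, z + dz))))) dx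
      = if (-(r - |dx|) ≤ b - y ∧ b - y < (r - |dx|) + 1 ∧
            -(r - |dx| - |b - y|) ≤ c - z ∧ c - z < (r - |dx| - |b - y|) + 1 ∧ x + dx = a)
        then 1 else 0))]
  rw [sum_map_ite_nat]
  rw [countP_pyRange_eq_ite _ _ (a - x) _ (by intro t ht; simp at ht; omega)]
  refine if_congr ?_ rfl rfl
  simp only [covers, decide_eq_true_eq, Int.abs_eq_natAbs]
  omega

lemma count_pts (nanobots : List ((Int × Int × Int) × Int)) (p : Int × Int × Int) :
    (pts nanobots).count p = nanobots.countP (fun bot => covers p bot) := by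
  unfold pts
  rw [List.count_flatMap]
  rw [List.map_congr_left (fun bot (_ : bot ∈ nanobots) =>
    (by simp only [Function.comp]; exact count_ball bot p :
      ((List.count p) ∘ ball) bot = if (covers p bot = true) then 1 else 0))]
  rw [sum_map_ite_nat nanobots (fun bot => covers p bot = true)]
  simp

lemma pts_ne_nil (nanobots : List ((Int × Int × Int) × Int)) (h : Pre_part2 nanobots) :
    pts nanobots ≠ [] := by
  obtain ⟨bot, hmem, hr⟩ := h
  have hc : covers (bot.1.1, bot.1.2.1, bot.1.2.2) bot = true := by
    simp [covers]; omega
  have hcount : 0 < (ball bot).count (bot.1.1, bot.1.2.1, bot.1.2.2) := by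
    rw [count_ball, if_pos hc]; norm_num
  have hb : (bot.1.1, bot.1.2.1, bot.1.2.2) ∈ ball bot := List.count_pos_iff.mp hcount
  exact List.ne_nil_of_mem (List.mem_flatMap.mpr ⟨bot, hmem, hb⟩)

-- membership of a TreeMap built by an insertion fold
lemma mem_foldl_insertT {β : Type} (l : List (Int × Int × Int))
    (f : Std.TreeMap (Int × Int × Int) β cmp3 → (Int × Int × Int) → β)
    (t0 : Std.TreeMap (Int × Int × Int) β cmp3) (p : Int × Int × Int) :
    p ∈ l.foldl (fun t x => t.insert x (f t x)) t0 ↔ p ∈ t0 ∨ p ∈ l := by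
  haveI := tc3
  induction l generalizing t0 with
  | nil => simp
  | cons x l ih =>
    rw [List.foldl_cons]
    refine Iff.trans (ih (t0.insert x (f t0 x))) ?_
    rw [Std.TreeMap.mem_insert, cmp3_eq_iff]
    simp only [List.mem_cons]
    constructor
    · rintro (⟨h | h⟩ | h) <;> tauto
    · rintro (h | h | h) <;> tauto

-- the value stored by the counting fold is the key's multiplicity in the inserted list
lemma getD_foldl_countT (l : List (Int × Int × Int))
    (t0 : Std.TreeMap (Int × Int × Int) Int cmp3) (p : Int × Int × Int) :
    (l.foldl (fun t x => t.insert x (t.getD x 0 + 1)) t0).getD p 0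
      = t0.getD p 0 + l.count p := by
  haveI := tc3
  induction l generalizing t0 with
  | nil => simp
  | cons x l ih =>
    rw [List.foldl_cons, ih]
    rw [Std.TreeMap.getD_insert]
    by_cases h : x = p
    · rw [if_pos ((cmp3_eq_iff x p).mpr h), List.count_cons]
      subst h
      have : (cmp3 x x = Ordering.eq) := (cmp3_eq_iff x x).mpr rfl
      simp
      omega
    · rw [if_neg (fun hc => h ((cmp3_eq_iff x p).mp hc)), List.count_cons]
      simp [h]

-- a TreeMap's pair list is its key list paired with the stored values
lemma toList_eq_keys_mapT {β : Type} [Inhabited β]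
    (t : Std.TreeMap (Int × Int × Int) β cmp3) :
    t.toList = t.keys.map (fun k => (k, t.getD k default)) := by
  haveI := tc3
  haveI := lec3
  rw [← Std.TreeMap.map_fst_toList_eq_keys, List.map_map]
  have : ∀ q ∈ t.toList, ((fun k => (k, t.getD k default)) ∘ Prod.fst) q = q := by
    rintro ⟨k, v⟩ hq
    have : t[k]? = some v := Std.TreeMap.mem_toList_iff_getElem?_eq_some.mp hq
    simp [Std.TreeMap.getD_eq_getD_getElem?, this]
  rw [List.map_congr_left this]
  simp

-- "best pair" characterisation: first component the maximum count, second the minimum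
-- distance among count-maximisers, both attained
def isBest (cnt dist : (Int × Int × Int) → Int) (ks : List (Int × Int × Int)) (pr : Int × Int) : Prop :=
  (∀ k ∈ ks, cnt k ≤ pr.1) ∧ (∃ k ∈ ks, cnt k = pr.1 ∧ dist k = pr.2) ∧
    (∀ k ∈ ks, cnt k = pr.1 → pr.2 ≤ dist k)

-- membership facts
lemma mem_ball_iff_covers (bot : (Int × Int × Int) × Int) (p : Int × Int × Int) :
    p ∈ ball bot ↔ covers p bot = true := by
  rw [← List.count_pos_iff, count_ball]
  by_cases h : covers p bot = true <;> simp [h]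

lemma mem_pts_iff_covers (nanobots : List ((Int × Int × Int) × Int)) (p : Int × Int × Int) :
    p ∈ pts nanobots ↔ ∃ bot ∈ nanobots, covers p bot = true := by
  unfold pts
  rw [List.mem_flatMap]
  constructor
  · rintro ⟨bot, h1, h2⟩; exact ⟨bot, h1, (mem_ball_iff_covers bot p).mp h2⟩
  · rintro ⟨bot, h1, h2⟩; exact ⟨bot, h1, (mem_ball_iff_covers bot p).mpr h2⟩

lemma mem_candsOf_iff (bot : (Int × Int × Int) × Int) (p : Int × Int × Int) :
    p ∈ candsOf bot ↔ ∃ dx dy : Int,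
      (-bot.2 ≤ dx ∧ dx < bot.2 + 1) ∧ (-(bot.2 - |dx|) ≤ dy ∧ dy < (bot.2 - |dx|) + 1) ∧
      (p = (bot.1.1 + dx, bot.1.2.1 + dy, bot.1.2.2 - (bot.2 - |dx| - |dy|)) ∨
       p = (bot.1.1 + dx, bot.1.2.1 + dy, bot.1.2.2 + (bot.2 - |dx| - |dy|)) ∨
       (p = (bot.1.1 + dx, bot.1.2.1 + dy, 0) ∧
        bot.1.2.2 - (bot.2 - |dx| - |dy|) ≤ 0 ∧ 0 ≤ bot.1.2.2 + (bot.2 - |dx| - |dy|))) := by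
  unfold candsOf
  simp only [List.mem_flatMap, PySem.List.mem_pyRange_one, List.mem_append, List.mem_cons,
    List.mem_singleton]
  constructor
  · rintro ⟨dx, hdx, dy, hdy, h⟩
    refine ⟨dx, dy, hdx, hdy, ?_⟩
    rcases h with (h | h | h) | h
    · exact Or.inl h
    · exact Or.inr (Or.inl h)
    · simp at h
    · split_ifs at h with hc
      · simp at h
        exact Or.inr (Or.inr ⟨h, hc⟩)
      · simp at h
  · rintro ⟨dx, dy, hdx, hdy, h⟩
    refine ⟨dx, hdx, dy, hdy, ?_⟩
    rcases h with h | h | ⟨h, hc⟩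
    · simp [h]
    · simp [h]
    · rw [if_pos hc]
      simp [h]

lemma covers_of_mem_candsOf (bot : (Int × Int × Int) × Int) (p : Int × Int × Int)
    (h : p ∈ candsOf bot) : covers p bot = true := by
  obtain ⟨⟨x, y, z⟩, r⟩ := bot
  obtain ⟨dx, dy, hdx, hdy, h⟩ := (mem_candsOf_iff _ p).mp h
  simp only [covers, decide_eq_true_eq]
  rcases h with h | h | ⟨h, hc1, hc2⟩ <;> subst h <;>
    simp only [add_sub_cancel_left, sub_sub_cancel_left, abs_neg, zero_sub,
      Int.abs_eq_natAbs] at * <;> omega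

lemma mem_pts_of_mem_cands (nanobots : List ((Int × Int × Int) × Int)) (p : Int × Int × Int)
    (h : p ∈ cands nanobots) : p ∈ pts nanobots := by
  obtain ⟨bot, hb, hp⟩ := List.mem_flatMap.mp h
  exact (mem_pts_iff_covers nanobots p).mpr ⟨bot, hb, covers_of_mem_candsOf bot p hp⟩

-- if the best point sits strictly above z = 0 and is not a candidate, every bot covering it
-- also covers the point one step down
lemma cover_down (nanobots : List ((Int × Int × Int) × Int)) (a b c : Int) (hc : 0 < c)
    (hno : (a, b, c) ∉ cands nanobots) (bot : (Int × Int × Int) × Int) (hbot : bot ∈ nanobots)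
    (hcov : covers (a, b, c) bot = true) : covers (a, b, c - 1) bot = true := by
  by_contra hnc
  apply hno
  refine List.mem_flatMap.mpr ⟨bot, hbot, (mem_candsOf_iff bot _).mpr ⟨a - bot.1.1, b - bot.1.2.1, ?_, ?_, Or.inl ?_⟩⟩
  · simp only [covers, decide_eq_true_eq] at hcov
    simp only [Int.abs_eq_natAbs] at *
    omega
  · simp only [covers, decide_eq_true_eq] at hcov
    simp only [Int.abs_eq_natAbs] at *
    omega
  · simp only [covers, decide_eq_true_eq] at hcov hnc
    simp only [Prod.mk.injEq]
    refine ⟨by omega, by omega, ?_⟩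
    simp only [Int.abs_eq_natAbs] at *
    omega

-- symmetric: strictly below z = 0, one step up
lemma cover_up (nanobots : List ((Int × Int × Int) × Int)) (a b c : Int) (hc : c < 0)
    (hno : (a, b, c) ∉ cands nanobots) (bot : (Int × Int × Int) × Int) (hbot : bot ∈ nanobots)
    (hcov : covers (a, b, c) bot = true) : covers (a, b, c + 1) bot = true := by
  by_contra hnc
  apply hno
  refine List.mem_flatMap.mpr ⟨bot, hbot, (mem_candsOf_iff bot _).mpr ⟨a - bot.1.1, b - bot.1.2.1, ?_, ?_, Or.inr (Or.inl ?_)⟩⟩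
  · simp only [covers, decide_eq_true_eq] at hcov
    simp only [Int.abs_eq_natAbs] at *
    omega
  · simp only [covers, decide_eq_true_eq] at hcov
    simp only [Int.abs_eq_natAbs] at *
    omega
  · simp only [covers, decide_eq_true_eq] at hcov hnc
    simp only [Prod.mk.injEq]
    refine ⟨by omega, by omega, ?_⟩
    simp only [Int.abs_eq_natAbs] at *
    omega

-- a covered point on the z = 0 plane is itself a candidate
lemma zero_mem_cands (nanobots : List ((Int × Int × Int) × Int)) (a b : Int)
    (bot : (Int × Int × Int) × Int) (hbot : bot ∈ nanobots)
    (hcov : covers (a, b, 0) bot = true) : (a, b, 0) ∈ cands nanobots := by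
  refine List.mem_flatMap.mpr ⟨bot, hbot, (mem_candsOf_iff bot _).mpr ⟨a - bot.1.1, b - bot.1.2.1, ?_, ?_, Or.inr (Or.inr ⟨?_, ?_, ?_⟩)⟩⟩ <;>
    simp only [covers, decide_eq_true_eq] at hcov
  · simp only [Int.abs_eq_natAbs] at *; omega
  · simp only [Int.abs_eq_natAbs] at *; omega
  · simp only [Prod.mk.injEq]
    exact ⟨by omega, by omega, trivial⟩
  · simp only [Int.abs_eq_natAbs] at *; omega
  · simp only [Int.abs_eq_natAbs] at *; omega

lemma cands_ne_nil (nanobots : List ((Int × Int × Int) × Int)) (h : Pre_part2 nanobots) :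
    cands nanobots ≠ [] := by
  obtain ⟨bot, hmem, hr⟩ := h
  refine List.ne_nil_of_mem (a := (bot.1.1, bot.1.2.1, bot.1.2.2 - bot.2)) ?_
  refine List.mem_flatMap.mpr ⟨bot, hmem, (mem_candsOf_iff bot _).mpr ⟨0, 0, ?_, ?_, Or.inl ?_⟩⟩
  · omega
  · simp only [abs_zero]; omega
  · simp

-- the best pair over all covered points is also the best pair over the candidates
lemma isBest_bridge (nanobots : List ((Int × Int × Int) × Int))
    (ksA ksB : List (Int × Int × Int))
    (hAm : ∀ x, x ∈ ksA ↔ x ∈ pts nanobots) (hBm : ∀ x, x ∈ ksB ↔ x ∈ cands nanobots)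
    {P Q : Int × Int}
    (hP : isBest (fun p => (nanobots.countP (fun bot => covers p bot) : Int))
      (fun p => |p.1| + |p.2.1| + |p.2.2|) ksA P)
    (hQ : isBest (fun p => (nanobots.countP (fun bot => covers p bot) : Int))
      (fun p => |p.1| + |p.2.1| + |p.2.2|) ksB Q) : Q = P := by
  obtain ⟨hP1, ⟨k, hkA, hk1, hk2⟩, hP3⟩ := hP
  obtain ⟨hQ1, ⟨j, hjB, hj1, hj2⟩, hQ3⟩ := hQ
  simp only [] at hk1 hk2 hj1 hj2
  -- the (P.1, P.2) optimum is attained at some candidate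
  have hwit : ∃ w ∈ cands nanobots,
      ((nanobots.countP (fun bot => covers w bot) : Int)) = P.1 ∧
      (|w.1| + |w.2.1| + |w.2.2|) = P.2 := by
    obtain ⟨a, b, c⟩ := k
    have hkpts : (a, b, c) ∈ pts nanobots := (hAm _).mp hkA
    have hkpos : 0 < nanobots.countP (fun bot => covers (a, b, c) bot) := by
      rw [List.countP_pos_iff]
      obtain ⟨bot, h1, h2⟩ := (mem_pts_iff_covers nanobots _).mp hkpts
      exact ⟨bot, h1, h2⟩
    rcases lt_trichotomy c 0 with hc | hc | hc
    · -- c < 0: k itself must be a candidate, else the point one step up beats it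
      by_cases hin : (a, b, c) ∈ cands nanobots
      · exact ⟨(a, b, c), hin, hk1, hk2⟩
      · exfalso
        have hmono : nanobots.countP (fun bot => covers (a, b, c) bot)
            ≤ nanobots.countP (fun bot => covers (a, b, c + 1) bot) :=
          List.countP_mono_left (fun bot hb hcv => cover_up nanobots a b c hc hin bot hb hcv)
        have hup_pts : (a, b, c + 1) ∈ pts nanobots := by
          rw [mem_pts_iff_covers]
          rw [List.countP_pos_iff] at hkpos
          obtain ⟨bot, h1, h2⟩ := hkpos
          exact ⟨bot, h1, cover_up nanobots a b c hc hin bot h1 h2⟩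
        have h1 := hP1 _ ((hAm _).mpr hup_pts)
        have h3 := hP3 _ ((hAm _).mpr hup_pts) (by simp only [] at h1 ⊢; omega)
        simp only [] at h1 h3
        simp only [Int.abs_eq_natAbs] at h3 hk2
        omega
    · -- c = 0: it is a candidate outright
      subst hc
      rw [List.countP_pos_iff] at hkpos
      obtain ⟨bot, h1, h2⟩ := hkpos
      exact ⟨(a, b, 0), zero_mem_cands nanobots a b bot h1 h2, hk1, hk2⟩
    · -- 0 < c: symmetric, one step down
      by_cases hin : (a, b, c) ∈ cands nanobots
      · exact ⟨(a, b, c), hin, hk1, hk2⟩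
      · exfalso
        have hmono : nanobots.countP (fun bot => covers (a, b, c) bot)
            ≤ nanobots.countP (fun bot => covers (a, b, c - 1) bot) :=
          List.countP_mono_left (fun bot hb hcv => cover_down nanobots a b c hc hin bot hb hcv)
        have hdn_pts : (a, b, c - 1) ∈ pts nanobots := by
          rw [mem_pts_iff_covers]
          rw [List.countP_pos_iff] at hkpos
          obtain ⟨bot, h1, h2⟩ := hkpos
          exact ⟨bot, h1, cover_down nanobots a b c hc hin bot h1 h2⟩
        have h1 := hP1 _ ((hAm _).mpr hdn_pts)
        have h3 := hP3 _ ((hAm _).mpr hdn_pts) (by simp only [] at h1 ⊢; omega)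
        simp only [] at h1 h3
        simp only [Int.abs_eq_natAbs] at h3 hk2
        omega
  obtain ⟨w, hwB, hw1, hw2⟩ := hwit
  -- Q.1 = P.1
  have hQ1P : Q.1 = P.1 := by
    refine le_antisymm ?_ ?_
    · have := hP1 j ((hAm _).mpr (mem_pts_of_mem_cands nanobots j ((hBm _).mp hjB)))
      simp only [] at this
      omega
    · have := hQ1 w ((hBm _).mpr hwB)
      simp only [] at this
      omega
  -- Q.2 = P.2
  have hQ2P : Q.2 = P.2 := by
    refine le_antisymm ?_ ?_
    · have := hQ3 w ((hBm _).mpr hwB) (by simp only []; omega)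
      simp only [] at this
      omega
    · have := hP3 j ((hAm _).mpr (mem_pts_of_mem_cands nanobots j ((hBm _).mp hjB)))
        (by simp only []; omega)
      simp only [] at this
      omega
  exact Prod.ext hQ1P hQ2P

lemma foldl_best_isBest (cnt dist : (Int × Int × Int) → Int) (ks : List (Int × Int × Int))
    (hne : ks ≠ []) :
    ∃ pr, ks.foldl (fun best p =>
        match best with
        | none => some (cnt p, dist p)
        | some (bc, bd) =>
            if cnt p > bc ∨ (cnt p = bc ∧ dist p < bd) then some (cnt p, dist p)
            else some (bc, bd)) none = some pr ∧ isBest cnt dist ks pr := by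
  induction ks using List.reverseRecOn with
  | nil => exact absurd rfl hne
  | append_singleton ks k ih =>
    rw [List.foldl_append]
    rcases eq_or_ne ks [] with h | h
    · subst h
      refine ⟨(cnt k, dist k), rfl, ?_⟩
      refine ⟨?_, ⟨k, by simp, rfl, rfl⟩, ?_⟩ <;> simp
    · obtain ⟨⟨bc, bd⟩, hfold, ⟨hb1, ⟨kb, hkb, hkb1, hkb2⟩, hb3⟩⟩ := ih h
      rw [hfold]
      simp only [List.foldl_cons, List.foldl_nil]
      by_cases hc : cnt k > bc ∨ (cnt k = bc ∧ dist k < bd)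
      · rw [if_pos hc]
        refine ⟨(cnt k, dist k), rfl, ?_, ⟨k, by simp, rfl, rfl⟩, ?_⟩
        · intro j hj
          simp only [List.mem_append, List.mem_singleton] at hj
          rcases hj with hj | hj
          · have := hb1 j hj; simp; omega
          · simp [hj]
        · intro j hj hj1
          simp only [List.mem_append, List.mem_singleton] at hj
          rcases hj with hj | hj
          · have h1 := hb1 j hj
            have h3 := hb3 j hj
            simp at hj1 ⊢
            omega
          · simp [hj]
      · rw [if_neg hc]
        push_neg at hc
        refine ⟨(bc, bd), rfl, ?_, ⟨kb, by simp [hkb], hkb1, hkb2⟩, ?_⟩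
        · intro j hj
          simp only [List.mem_append, List.mem_singleton] at hj
          rcases hj with hj | hj
          · exact hb1 j hj
          · subst hj; simp; omega
        · intro j hj hj1
          simp only [List.mem_append, List.mem_singleton] at hj
          simp at hj1
          rcases hj with hj | hj
          · exact hb3 j hj hj1
          · subst hj; omega

lemma A_isBest (cnt dist : (Int × Int × Int) → Int) (ks : List (Int × Int × Int))
    (hne : ks ≠ []) :
    isBest cnt dist ks
      (((PySem.List.max? (ks.map cnt) (fun v => v)).getD 0),
        ((PySem.List.min? ((ks.filter (fun k =>
            cnt k == (PySem.List.max? (ks.map cnt) (fun v => v)).getD 0)).map dist)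
          (fun v => v)).getD 0)) := by
  obtain ⟨M, hM⟩ : ∃ M, PySem.List.max? (ks.map cnt) (fun v => v) = some M := by
    rcases h : PySem.List.max? (ks.map cnt) (fun v => v) with _ | M
    · rw [PySem.List.max?_eq_none_iff] at h
      simp [List.map_eq_nil_iff] at h
      exact absurd h hne
    · exact ⟨M, rfl⟩
  have hMmax : ∀ j ∈ ks, cnt j ≤ M := by
    intro j hj
    exact PySem.List.max?_isMax hM (cnt j) (List.mem_map_of_mem hj)
  obtain ⟨km, hkm, hkmc⟩ := List.mem_map.mp (PySem.List.max?_mem hM)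
  have hkmf : km ∈ ks.filter (fun k => cnt k == (PySem.List.max? (ks.map cnt) (fun v => v)).getD 0) := by
    rw [List.mem_filter]
    exact ⟨hkm, by simp [hM, hkmc]⟩
  obtain ⟨m, hm⟩ : ∃ m, PySem.List.min? ((ks.filter (fun k =>
      cnt k == (PySem.List.max? (ks.map cnt) (fun v => v)).getD 0)).map dist) (fun v => v) = some m := by
    rcases h : PySem.List.min? ((ks.filter (fun k =>
        cnt k == (PySem.List.max? (ks.map cnt) (fun v => v)).getD 0)).map dist) (fun v => v) with _ | m
    · rw [PySem.List.min?_eq_none_iff] at h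
      rw [List.map_eq_nil_iff] at h
      rw [h] at hkmf
      simp at hkmf
    · exact ⟨m, rfl⟩
  obtain ⟨k0, hk0f, hk0d⟩ := List.mem_map.mp (PySem.List.min?_mem hm)
  rw [List.mem_filter] at hk0f
  rw [hM] at hm hkmf hk0f ⊢
  rw [hm]
  simp only [Option.getD_some]
  refine ⟨hMmax, ⟨k0, hk0f.1, ?_, hk0d⟩, ?_⟩
  · have := hk0f.2
    simp at this
    exact this
  · intro j hj hjc
    have : dist j ∈ (ks.filter (fun k =>
        cnt k == (some M : Option Int).getD 0)).map dist := by
      refine List.mem_map_of_mem ?_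
      rw [List.mem_filter]
      exact ⟨hj, by simp [hjc]⟩
    exact PySem.List.min?_isMin hm (dist j) this

-- A's loop builds exactly the flattened counting fold over pts
lemma part2_dict_eq (nanobots : List ((Int × Int × Int) × Int)) :
    nanobots.foldl (fun count bot =>
      (PySem.List.pyRange (-bot.2) (bot.2 + 1) 1).foldl (fun count dx =>
        (PySem.List.pyRange (-(bot.2 - |dx|)) ((bot.2 - |dx|) + 1) 1).foldl (fun count dy =>
          (PySem.List.pyRange (-(bot.2 - |dx| - |dy|)) ((bot.2 - |dx| - |dy|) + 1) 1).foldl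
            (fun count dz =>
              if count.contains (bot.1.1 + dx, bot.1.2.1 + dy, bot.1.2.2 + dz) then
                count.insert (bot.1.1 + dx, bot.1.2.1 + dy, bot.1.2.2 + dz)
                  (count.getD (bot.1.1 + dx, bot.1.2.1 + dy, bot.1.2.2 + dz) 0 + 1)
              else
                count.insert (bot.1.1 + dx, bot.1.2.1 + dy, bot.1.2.2 + dz) 1) count) count) count)
      (∅ : Std.TreeMap (Int × Int × Int) Int cmp3)
    = (pts nanobots).foldl (fun t loc => t.insert loc (t.getD loc 0 + 1)) ∅ := by
  haveI := tc3
  have hstep : ∀ (t : Std.TreeMap (Int × Int × Int) Int cmp3) (loc : Int × Int × Int),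
      (if t.contains loc then t.insert loc (t.getD loc 0 + 1) else t.insert loc 1)
      = t.insert loc (t.getD loc 0 + 1) := by
    intro t loc
    by_cases h : t.contains loc = true
    · rw [if_pos h]
    · rw [if_neg h, Std.TreeMap.getD_eq_fallback_of_contains_eq_false (Bool.not_eq_true _ ▸ h)]
      norm_num
  unfold pts ball
  rw [List.foldl_flatMap]
  simp only [List.foldl_flatMap, List.foldl_map, hstep]

-- the three conditional inserts of one column, as a fold over the column's candidate list
lemma foldl_ins_column (s : Std.TreeMap (Int × Int × Int) Unit cmp3)
    (p q w : Int × Int × Int) (c : Prop) [Decidable c] :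
    ([p, q] ++ if c then [w] else []).foldl (fun t loc => t.insert loc ()) s
      = if c then ((s.insert p ()).insert q ()).insert w () else (s.insert p ()).insert q () := by
  by_cases h : c <;> simp [h]

-- B's loop builds exactly the candidate set
lemma part2_cand_eq (nanobots : List ((Int × Int × Int) × Int)) :
    nanobots.foldl (fun s bot =>
      (PySem.List.pyRange (-bot.2) (bot.2 + 1) 1).foldl (fun s dx =>
        (PySem.List.pyRange (-(bot.2 - |dx|)) ((bot.2 - |dx|) + 1) 1).foldl (fun s dy =>
          if bot.1.2.2 - (bot.2 - |dx| - |dy|) ≤ 0 ∧ 0 ≤ bot.1.2.2 + (bot.2 - |dx| - |dy|) then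
            (((s.insert (bot.1.1 + dx, bot.1.2.1 + dy, bot.1.2.2 - (bot.2 - |dx| - |dy|)) ()).insert
                (bot.1.1 + dx, bot.1.2.1 + dy, bot.1.2.2 + (bot.2 - |dx| - |dy|)) ()).insert
                (bot.1.1 + dx, bot.1.2.1 + dy, 0) ())
          else
            ((s.insert (bot.1.1 + dx, bot.1.2.1 + dy, bot.1.2.2 - (bot.2 - |dx| - |dy|)) ()).insert
                (bot.1.1 + dx, bot.1.2.1 + dy, bot.1.2.2 + (bot.2 - |dx| - |dy|)) ())) s) s)
      (∅ : Std.TreeMap (Int × Int × Int) Unit cmp3)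
    = (cands nanobots).foldl (fun t loc => t.insert loc ()) ∅ := by
  unfold cands candsOf
  rw [List.foldl_flatMap]
  simp only [List.foldl_flatMap, foldl_ins_column]

lemma distance_zero (loc : Int × Int × Int) :
    distance (0, 0, 0) loc = |loc.1| + |loc.2.1| + |loc.2.2| := by
  simp [distance]

-- ===== VERDICT (by name: the statement is the Claim_ definition above) =====
theorem part2_spec : Claim_equal_part2 := by
  haveI := tc3
  haveI := lec3
  intro nanobots _ hpre
  unfold Spec_part2
  -- the two containers hold exactly the points of pts
  have hmemA : ∀ p, p ∈ ((pts nanobots).foldl (fun t loc => t.insert loc (t.getD loc 0 + 1))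
      (∅ : Std.TreeMap (Int × Int × Int) Int cmp3)).keys ↔ p ∈ pts nanobots := by
    intro p
    rw [Std.TreeMap.mem_keys, mem_foldl_insertT (f := fun t x => t.getD x 0 + 1)]
    simp [Std.TreeMap.not_mem_emptyc]
  have hmemB : ∀ p, p ∈ ((cands nanobots).foldl (fun t loc => t.insert loc ())
      (∅ : Std.TreeMap (Int × Int × Int) Unit cmp3)).keys ↔ p ∈ cands nanobots := by
    intro p
    rw [Std.TreeMap.mem_keys, mem_foldl_insertT (f := fun _ _ => ())]
    simp [Std.TreeMap.not_mem_emptyc]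
  have hneA : ((pts nanobots).foldl (fun t loc => t.insert loc (t.getD loc 0 + 1))
      (∅ : Std.TreeMap (Int × Int × Int) Int cmp3)).keys ≠ [] := by
    obtain ⟨p, hp⟩ := List.exists_mem_of_ne_nil _ (pts_ne_nil nanobots hpre)
    exact List.ne_nil_of_mem ((hmemA p).mpr hp)
  have hneB : ((cands nanobots).foldl (fun t loc => t.insert loc ())
      (∅ : Std.TreeMap (Int × Int × Int) Unit cmp3)).keys ≠ [] := by
    obtain ⟨p, hp⟩ := List.exists_mem_of_ne_nil _ (cands_ne_nil nanobots hpre)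
    exact List.ne_nil_of_mem ((hmemB p).mpr hp)
  obtain ⟨pr, hfold, hbest⟩ := foldl_best_isBest
    (fun p => (nanobots.countP (fun bot => covers p bot) : Int))
    (fun p => |p.1| + |p.2.1| + |p.2.2|) _ hneB
  have hA := A_isBest
    (fun p => (nanobots.countP (fun bot => covers p bot) : Int))
    (fun p => |p.1| + |p.2.1| + |p.2.2|) _ hneA
  have hpair := isBest_bridge nanobots _ _ hmemA hmemB hA hbest
  simp only [] at hfold hpair
  -- B's side: the tracked best is pr
  have hB : part2_alt nanobots = pr.2 := by
    simp only [part2_alt]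
    rw [part2_cand_eq]
    rw [hfold]
  -- A's side
  have hgetD : ∀ p, ((pts nanobots).foldl (fun t loc => t.insert loc (t.getD loc 0 + 1))
      (∅ : Std.TreeMap (Int × Int × Int) Int cmp3)).getD p 0
      = (nanobots.countP (fun bot => covers p bot) : Int) := by
    intro p
    rw [getD_foldl_countT, count_pts]
    simp [Std.TreeMap.getD_emptyc]
  have hitems : ((pts nanobots).foldl (fun t loc => t.insert loc (t.getD loc 0 + 1))
      (∅ : Std.TreeMap (Int × Int × Int) Int cmp3)).toList
      = ((pts nanobots).foldl (fun t loc => t.insert loc (t.getD loc 0 + 1))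
          (∅ : Std.TreeMap (Int × Int × Int) Int cmp3)).keys.map
          (fun k => (k, (nanobots.countP (fun bot => covers k bot) : Int))) := by
    rw [toList_eq_keys_mapT]
    exact List.map_congr_left (fun k _ => by rw [show (default : Int) = 0 from rfl, hgetD])
  have hAv : part2 nanobots = pr.2 := by
    simp only [part2]
    rw [part2_dict_eq, hitems]
    rw [List.filter_map, List.map_map, List.map_map, List.map_map]
    simp only [Function.comp_def, distance_zero]
    rw [hpair]
  rw [hAv, hB]
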